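-- pv_equiv track=rewrite | github.com/tomilov-dev/DSA | leetcode_problems/python/lc2335_min_amount_of_time_to_fill_cups_with_water.py | fill_both
-- ===== SOURCE A (Python) =====
-- def fill_both(amount: list[int]) -> int:
--     time = 0
--     amount.sort(reverse=True)
--     i = 0
--     while amount[i] > 0:
--         j = 1 if amount[1] >= amount[2] else 2
--         if amount[i] > 0 and amount[j] > 0:
--             amount[i] -= 1
--             amount[j] -= 1
--             time += 1
--         else:
--             break
--
--     return time
-- ===== SOURCE B (Python) =====
-- def fill_both(amount: list[int]) -> int:
--     m1, m2, m3 = sorted(amount, reverse=True)[:3]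
--     return min(max(m1, 0), max(m2, 0) + max(m3, 0))
-- ===== Notes on version B (the rewrite author's own statement) =====
-- stated objective: faster
-- what changed: Replaces the unit-by-unit decrement loop (one iteration per second of fill time) with the closed form min(max(m1,0), max(m2,0)+max(m3,0)) over the three largest values, which is exactly what A's loop computes.
-- outside the precondition, e.g. on fill_both([-1]): A returns 0, B raises ValueError
import Mathlib
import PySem

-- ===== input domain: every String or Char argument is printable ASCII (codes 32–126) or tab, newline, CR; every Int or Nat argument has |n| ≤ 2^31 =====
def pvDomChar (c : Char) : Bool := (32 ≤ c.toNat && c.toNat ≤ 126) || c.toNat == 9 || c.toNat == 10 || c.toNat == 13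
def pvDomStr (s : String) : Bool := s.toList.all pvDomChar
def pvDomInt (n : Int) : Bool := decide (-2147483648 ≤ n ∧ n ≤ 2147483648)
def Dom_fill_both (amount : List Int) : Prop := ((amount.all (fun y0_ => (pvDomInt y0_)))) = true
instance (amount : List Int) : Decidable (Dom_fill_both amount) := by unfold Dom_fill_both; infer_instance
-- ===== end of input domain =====

-- B replaces A's per-second decrement loop by the closed form min(max(m1,0), max(m2,0)+max(m3,0))
-- over the three largest values; equivalence is about the RETURN value only (A sorts/mutates its argument in place, B does not).

-- ===== PORT A =====
-- the while loop of A over the (sorted-descending) list; time is the accumulator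
def fill_both_loop (a : List Int) (time : Int) : Int :=
  if h : a.getD 0 0 > 0 then
    let j : Nat := if a.getD 1 0 ≥ a.getD 2 0 then 1 else 2
    if a.getD 0 0 > 0 ∧ a.getD j 0 > 0 then
      fill_both_loop ((a.set 0 (a.getD 0 0 - 1)).set j (a.getD j 0 - 1)) (time + 1)
    else time
  else time
termination_by (a.getD 0 0).toNat
decreasing_by
  cases a with
  | nil => simp at h
  | cons x t =>
    have hx : (0:Int) < x := by simpa using h
    split <;> (cases t with
      | nil => simp; omega
      | cons y u => cases u <;> simp <;> omega)

def fill_both (amount : List Int) : Int :=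
  fill_both_loop (PySem.List.sorted amount (fun x => x) true) 0

-- ===== PORT B =====
def fill_both_alt (amount : List Int) : Int :=
  let top := PySem.List.slice (PySem.List.sorted amount (fun x => x) true) none (some 3)
  let m1 := top.getD 0 0
  let m2 := top.getD 1 0
  let m3 := top.getD 2 0
  min (max m1 0) (max m2 0 + max m3 0)

-- ===== PRECONDITION & SPEC =====
-- Pre_ excludes lists with fewer than 3 elements: A indexes the second and third elements and raises IndexError
-- whenever the loop body is reached (only when every element is ≤ 0 does A return 0 by short-circuit).
def Pre_fill_both (amount : List Int) : Prop := 3 ≤ amount.length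
instance (amount : List Int) : Decidable (Pre_fill_both amount) := by unfold Pre_fill_both; infer_instance
def pvWitness_fill_both : List Int := [4, 2, 7]
def Spec_fill_both (amount : List Int) (out : Int) : Prop := out = fill_both_alt amount
instance (amount : List Int) (out : Int) : Decidable (Spec_fill_both amount out) := by unfold Spec_fill_both; infer_instance

-- ===== CLAIM (what is proved, stated in full; the proofs are below) =====
def Claim_equal_fill_both : Prop := ∀ (amount : List Int), Dom_fill_both amount → Pre_fill_both amount → Spec_fill_both amount (fill_both amount)

-- ===== LEMMAS AND PROOFS =====
-- One step of the loop on a ≥3-element list, in terms of the first three entries.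
lemma fill_both_loop_closed (n : Nat) : ∀ (a b c : Int) (rest : List Int) (t : Int),
    a.toNat ≤ n →
    fill_both_loop (a :: b :: c :: rest) t = t + min (max a 0) (max b 0 + max c 0) := by
  induction n with
  | zero =>
    intro a b c rest t ha
    have ha' : a ≤ 0 := by omega
    rw [fill_both_loop]
    simp only [List.getD_cons_zero]
    rw [dif_neg (by omega)]
    omega
  | succ n ih =>
    intro a b c rest t ha
    rw [fill_both_loop]
    simp only [List.getD_cons_zero, List.getD_cons_succ]
    by_cases h0 : a > 0
    · rw [dif_pos h0]
      by_cases hbc : b ≥ c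
      · simp only [if_pos hbc, List.getD_cons_succ, List.getD_cons_zero]
        by_cases hb : b > 0
        · rw [if_pos ⟨h0, hb⟩]
          simp only [List.set]
          rw [ih (a - 1) (b - 1) c rest (t + 1) (by omega)]
          omega
        · rw [if_neg (by tauto)]
          omega
      · simp only [if_neg hbc, List.getD_cons_succ, List.getD_cons_zero]
        by_cases hc : c > 0
        · rw [if_pos ⟨h0, hc⟩]
          simp only [List.set]
          rw [ih (a - 1) b (c - 1) rest (t + 1) (by omega)]
          omega
        · rw [if_neg (by tauto)]
          omega
    · rw [dif_neg h0]
      omega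

-- ===== VERDICT (by name: the statement is the Claim_ definition above) =====
theorem fill_both_spec : Claim_equal_fill_both := by
  intro amount _ hpre
  have hlen : 3 ≤ (PySem.List.sorted amount (fun x => x) true).length := by
    rw [PySem.List.length_sorted]; exact hpre
  obtain ⟨a, b, c, rest, hs⟩ :
      ∃ a b c rest, PySem.List.sorted amount (fun x => x) true = a :: b :: c :: rest := by
    match h : PySem.List.sorted amount (fun x => x) true with
    | x :: y :: z :: r => exact ⟨x, y, z, r, rfl⟩
    | [] | [_] | [_, _] => rw [h] at hlen <;> simp at hlen
  unfold Spec_fill_both fill_both fill_both_alt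
  rw [hs, fill_both_loop_closed (a.toNat) a b c rest 0 le_rfl]
  simp [PySem.List.slice]
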